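-- pv_equiv track=rewrite | github.com/xiaoshuai155vv/friday | scripts/evolution_learning_strategy_optimizer.py | _find_consecutive_successes
-- ===== SOURCE A (Python) =====
-- from typing import Dict, List, Any, Optional, Tuple
--
-- def _find_consecutive_successes(evolutions: List[Dict]) -> int:
--     """查找连续成功次数"""
--     max_consecutive = 0
--     current_consecutive = 0
--
--     for evo in evolutions:
--         if evo.get("status") == "completed":
--             current_consecutive += 1
--             max_consecutive = max(max_consecutive, current_consecutive)
--         else:
--             current_consecutive = 0
--
--     return max_consecutive
-- ===== SOURCE B (Python) =====
-- from itertools import groupby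
--
--
-- def _find_consecutive_successes(evolutions):
--     """Longest run of consecutive 'completed' statuses, via groupby over runs."""
--     return max(
--         (sum(1 for _ in group)
--          for completed, group in groupby(evolutions, key=lambda e: e.get("status") == "completed")
--          if completed),
--         default=0,
--     )
-- ===== Notes on version B (the rewrite author's own statement) =====
-- stated objective: idiomatic
-- what changed: Replaces the manual current/max counter loop by itertools.groupby over maximal runs keyed on completed-ness, taking the max run length of the True groups with default 0.
import Mathlib
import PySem

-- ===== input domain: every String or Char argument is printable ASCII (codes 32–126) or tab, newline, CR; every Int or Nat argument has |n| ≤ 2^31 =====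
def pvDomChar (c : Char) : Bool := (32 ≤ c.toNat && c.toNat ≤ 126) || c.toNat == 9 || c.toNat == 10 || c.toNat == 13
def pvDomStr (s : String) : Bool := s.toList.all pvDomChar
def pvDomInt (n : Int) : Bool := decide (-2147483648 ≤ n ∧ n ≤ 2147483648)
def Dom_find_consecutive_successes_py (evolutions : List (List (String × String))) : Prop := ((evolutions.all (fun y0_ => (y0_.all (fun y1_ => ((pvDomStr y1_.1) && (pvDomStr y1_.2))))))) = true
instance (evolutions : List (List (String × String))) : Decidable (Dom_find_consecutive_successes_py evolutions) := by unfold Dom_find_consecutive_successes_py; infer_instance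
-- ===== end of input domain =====

-- B replaces A's manual current/max counter loop by a groupby-style decomposition into
-- maximal runs of equal completed-ness, taking the max length of the True runs (idiomatic).


-- ===== PORT A =====
-- evo.get("status") == "completed"  (first-match assoc lookup; None ≠ "completed")
def pvStatusCompleted (evo : List (String × String)) : Bool :=
  (PySem.Dict.mk evo).get? "status" == some "completed"

-- loop body of A: state = (max_consecutive, current_consecutive)
def pvStepA (st : Int × Int) (evo : List (String × String)) : Int × Int :=
  if pvStatusCompleted evo then (max st.1 (st.2 + 1), st.2 + 1) else (st.1, 0)

def find_consecutive_successes_py (evolutions : List (List (String × String))) : Int :=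
  (evolutions.foldl pvStepA (0, 0)).1

-- ===== PORT B =====
-- groupby helper: length of the maximal prefix whose key equals k, plus the remaining suffix
def pvSpan (k : Bool) : List (List (String × String)) → Int × List (List (String × String))
  | [] => (0, [])
  | e :: rest =>
      if pvStatusCompleted e = k then ((pvSpan k rest).1 + 1, (pvSpan k rest).2)
      else (0, e :: rest)

theorem pvSpan_len (k : Bool) : ∀ xs : List (List (String × String)),
    (pvSpan k xs).2.length ≤ xs.length := by
  intro xs
  induction xs with
  | nil => simp [pvSpan]
  | cons e rest ih =>
      by_cases h : pvStatusCompleted e = k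
      · simp only [pvSpan, h, if_true, List.length_cons]
        omega
      · simp [pvSpan, h]

-- itertools.groupby keyed on completed-ness: list of (key, run length)
def pvGroups : List (List (String × String)) → List (Bool × Int)
  | [] => []
  | e :: rest =>
      (pvStatusCompleted e, (pvSpan (pvStatusCompleted e) rest).1 + 1)
        :: pvGroups (pvSpan (pvStatusCompleted e) rest).2
  termination_by xs => xs.length
  decreasing_by
    have := pvSpan_len (pvStatusCompleted e) rest
    simp only [List.length_cons]; omega

-- max(lengths of True groups, default=0)
def find_consecutive_successes_py_alt (evolutions : List (List (String × String))) : Int :=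
  ((pvGroups evolutions).filterMap (fun g => if g.1 then some g.2 else none)).foldl max 0

-- ===== PRECONDITION & SPEC =====
def Spec_find_consecutive_successes_py (evolutions : List (List (String × String))) (out : Int) : Prop := out = find_consecutive_successes_py_alt evolutions
instance (evolutions : List (List (String × String))) (out : Int) : Decidable (Spec_find_consecutive_successes_py evolutions out) := by unfold Spec_find_consecutive_successes_py; infer_instance

-- ===== CLAIM (what is proved, stated in full; the proofs are below) =====
def Claim_equal_find_consecutive_successes_py : Prop := ∀ (evolutions : List (List (String × String))), Dom_find_consecutive_successes_py evolutions → Spec_find_consecutive_successes_py evolutions (find_consecutive_successes_py evolutions)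

-- ===== LEMMAS AND PROOFS =====

theorem pvSpan_nonneg (k : Bool) : ∀ xs : List (List (String × String)),
    0 ≤ (pvSpan k xs).1 := by
  intro xs
  induction xs with
  | nil => simp [pvSpan]
  | cons e rest ih =>
      by_cases h : pvStatusCompleted e = k
      · simp only [pvSpan, h, if_true]; omega
      · simp [pvSpan, h]

theorem pvSpan_head_ne (k : Bool) : ∀ (xs : List (List (String × String)))
    (e' : List (String × String)) (r' : List (List (String × String))),
    (pvSpan k xs).2 = e' :: r' → pvStatusCompleted e' ≠ k := by
  intro xs
  induction xs with
  | nil => intro e' r' h; simp [pvSpan] at h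
  | cons x t ih =>
      intro e' r' h
      by_cases hk : pvStatusCompleted x = k
      · simp only [pvSpan, hk, if_true] at h
        exact ih e' r' h
      · simp only [pvSpan, hk, if_false] at h
        obtain ⟨h1, _⟩ := List.cons.injEq x t e' r' ▸ h
        exact h1 ▸ hk

theorem foldl_max_le (L : List Int) : ∀ a : Int, a ≤ L.foldl max a := by
  induction L with
  | nil => intro a; simp
  | cons x L ih =>
      intro a
      calc a ≤ max a x := le_max_left a x
        _ ≤ (x :: L).foldl max a := by simpa [List.foldl] using ih (max a x)

theorem foldl_max_max (L : List Int) : ∀ a b : Int,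
    L.foldl max (max a b) = max a (L.foldl max b) := by
  induction L with
  | nil => intro a b; simp
  | cons x L ih =>
      intro a b
      simp only [List.foldl]
      rw [max_assoc, ih]

-- alt of a list starting with a non-completed element: the False group is dropped
theorem alt_false_cons (e : List (String × String)) (xs : List (List (String × String)))
    (h : pvStatusCompleted e = false) :
    find_consecutive_successes_py_alt (e :: xs)
      = find_consecutive_successes_py_alt (pvSpan false xs).2 := by
  simp only [find_consecutive_successes_py_alt]
  rw [pvGroups]
  simp [h]

theorem alt_span_false (xs : List (List (String × String))) :
    find_consecutive_successes_py_alt (pvSpan false xs).2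
      = find_consecutive_successes_py_alt xs := by
  cases xs with
  | nil => simp [pvSpan]
  | cons e t =>
      by_cases h : pvStatusCompleted e = false
      · simp only [pvSpan, h, if_true]
        exact (alt_false_cons e t h).symm
      · simp [pvSpan, h]

theorem alt_nil : find_consecutive_successes_py_alt [] = 0 := by
  simp [find_consecutive_successes_py_alt, pvGroups]

theorem alt_nonneg (xs : List (List (String × String))) :
    0 ≤ find_consecutive_successes_py_alt xs :=
  foldl_max_le _ 0

-- folding A's step through a maximal completed run
theorem foldl_step_true : ∀ (xs : List (List (String × String))) (m c : Int), c ≤ m →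
    xs.foldl pvStepA (m, c)
      = (pvSpan true xs).2.foldl pvStepA
          (max m (c + (pvSpan true xs).1), c + (pvSpan true xs).1) := by
  intro xs
  induction xs with
  | nil =>
      intro m c hcm
      simp [pvSpan, max_eq_left hcm]
  | cons e t ih =>
      intro m c hcm
      by_cases hk : pvStatusCompleted e = true
      · simp only [pvSpan, hk, if_true]
        simp only [List.foldl, pvStepA, hk, if_true]
        rw [ih (max m (c + 1)) (c + 1) (le_max_right _ _)]
        have hn := pvSpan_nonneg true t
        have h1 : max (max m (c + 1)) (c + 1 + (pvSpan true t).1)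
            = max m (c + ((pvSpan true t).1 + 1)) := by omega
        have h2 : c + 1 + (pvSpan true t).1 = c + ((pvSpan true t).1 + 1) := by omega
        rw [h1, h2]
      · simp only [pvSpan, hk]
        simp [max_eq_left hcm]

-- folding A's step through a maximal non-completed run: state unchanged
theorem foldl_step_false : ∀ (xs : List (List (String × String))) (m : Int),
    xs.foldl pvStepA (m, 0) = (pvSpan false xs).2.foldl pvStepA (m, 0) := by
  intro xs
  induction xs with
  | nil => intro m; simp [pvSpan]
  | cons e t ih =>
      intro m
      by_cases hk : pvStatusCompleted e = false
      · simp only [pvSpan, hk, if_true]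
        simp only [List.foldl, pvStepA, hk]
        simpa using ih m
      · simp [pvSpan, hk]

-- main invariant, by strong induction on length via fuel
theorem main_inv : ∀ (N : ℕ) (xs : List (List (String × String))) (m : Int),
    xs.length ≤ N → 0 ≤ m →
    (xs.foldl pvStepA (m, 0)).1 = max m (find_consecutive_successes_py_alt xs) := by
  intro N
  induction N with
  | zero =>
      intro xs m hlen hm
      have : xs = [] := List.eq_nil_of_length_eq_zero (Nat.le_zero.mp hlen)
      subst this
      simp [alt_nil, max_eq_left hm]
  | succ N ih =>
      intro xs m hlen hm
      cases xs with
      | nil => simp [alt_nil, max_eq_left hm]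
      | cons e t =>
          simp only [List.length_cons] at hlen
          by_cases hk : pvStatusCompleted e = true
          · -- completed head: consume the true run
            simp only [List.foldl, pvStepA, hk, if_true]
            rw [foldl_step_true t (max m (0 + 1)) (0 + 1) (le_max_right _ _)]
            have hn := pvSpan_nonneg true t
            have hsl := pvSpan_len true t
            set n := (pvSpan true t).1 with hndef
            set r := (pvSpan true t).2 with hrdef
            have halt : find_consecutive_successes_py_alt (e :: t)
                = max (n + 1) (find_consecutive_successes_py_alt r) := by
              simp only [find_consecutive_successes_py_alt]
              rw [pvGroups]
              simp only [hk, if_true, List.filterMap_cons, ← hndef, ← hrdef]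
              simp only [List.foldl]
              have : max 0 (n + 1) = max (n + 1) 0 := max_comm _ _
              rw [this, foldl_max_max]
            cases hr : r with
            | nil =>
                simp only [List.foldl]
                rw [halt, hr, alt_nil]
                omega
            | cons e' r' =>
                have hne : pvStatusCompleted e' ≠ true := pvSpan_head_ne true t e' r' (hrdef ▸ hr)
                have hne' : pvStatusCompleted e' = false := by
                  cases h : pvStatusCompleted e' with
                  | false => rfl
                  | true => exact absurd h hne
                simp only [List.foldl, pvStepA, hne', Bool.false_eq_true, if_false]
                have hr'len : r'.length ≤ N := by
                  have : r.length ≤ t.length := hrdef ▸ hsl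
                  rw [hr] at this
                  simp only [List.length_cons] at this
                  omega
                rw [ih r' _ hr'len (by omega)]
                have haltr : find_consecutive_successes_py_alt (e' :: r')
                    = find_consecutive_successes_py_alt r' := by
                  rw [alt_false_cons e' r' hne', alt_span_false]
                rw [halt, hr, haltr]
                omega
          · have hk' : pvStatusCompleted e = false := by
              cases h : pvStatusCompleted e with
              | false => rfl
              | true => exact absurd h hk
            simp only [List.foldl, pvStepA, hk', Bool.false_eq_true, if_false]
            rw [foldl_step_false t m]
            have hsl := pvSpan_len false t
            rw [ih (pvSpan false t).2 m (by omega) hm]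
            rw [alt_false_cons e t hk', alt_span_false]

-- ===== VERDICT (by name: the statement is the Claim_ definition above) =====
theorem find_consecutive_successes_py_spec : Claim_equal_find_consecutive_successes_py := by
  intro evolutions _
  show find_consecutive_successes_py evolutions = find_consecutive_successes_py_alt evolutions
  unfold find_consecutive_successes_py
  rw [main_inv evolutions.length evolutions 0 le_rfl le_rfl]
  exact max_eq_right (alt_nonneg evolutions)
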